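-- pv_equiv track=rewrite | github.com/MSGitt/Coding-Study | 프로그래머스/lv2/42626. 더 맵게/더 맵게.py | solution
-- ===== SOURCE A (Python) =====
-- import heapq
--
-- def solution(scoville, K):
--
--     heapq.heapify(scoville)
--     count = 0
--
--     while scoville[0] < K :
--
--         if len(scoville) == 1 and scoville[0] < K :
--             return -1
--
--         temp = heapq.heappop(scoville) + 2 * heapq.heappop(scoville)
--         heapq.heappush(scoville, temp)
--         count += 1
--
--     return count
-- ===== SOURCE B (Python) =====
-- def solution(scoville, K):
--     # Two-queue (linear-time Huffman) strategy: sort once; merged values are produced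
--     # in non-decreasing order, so a plain FIFO list replaces the priority queue and
--     # each merge step is O(1).  Mutates scoville by sorting it (return-value equivalence).
--     scoville.sort()
--     n = len(scoville)
--     merged = []          # merged values in production order
--     i = j = 0            # fronts of the two queues
--     count = 0
--     while True:
--         if i < n and (j == len(merged) or scoville[i] <= merged[j]):
--             smallest = scoville[i]
--         else:
--             smallest = merged[j]      # IndexError on empty input, like A's scoville[0]
--         if smallest >= K:
--             return count
--         if (n - i) + (len(merged) - j) == 1:
--             return -1
--         pair = []
--         for _ in range(2):           # pop the two smallest across the two queue fronts
--             if i < n and (j == len(merged) or scoville[i] <= merged[j]):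
--                 pair.append(scoville[i]); i += 1
--             else:
--                 pair.append(merged[j]); j += 1
--         merged.append(pair[0] + 2 * pair[1])
--         count += 1
-- ===== Notes on version B (the rewrite author's own statement) =====
-- stated objective: faster
-- what changed: Replaces the binary heap by the two-queue linear-time-Huffman scheme: sort once, then keep a plain FIFO list of merged values (which are provably produced in non-decreasing order), so each merge step reads and pops the fronts of two queues in O(1) instead of O(log n) heap operations.
import Mathlib
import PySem

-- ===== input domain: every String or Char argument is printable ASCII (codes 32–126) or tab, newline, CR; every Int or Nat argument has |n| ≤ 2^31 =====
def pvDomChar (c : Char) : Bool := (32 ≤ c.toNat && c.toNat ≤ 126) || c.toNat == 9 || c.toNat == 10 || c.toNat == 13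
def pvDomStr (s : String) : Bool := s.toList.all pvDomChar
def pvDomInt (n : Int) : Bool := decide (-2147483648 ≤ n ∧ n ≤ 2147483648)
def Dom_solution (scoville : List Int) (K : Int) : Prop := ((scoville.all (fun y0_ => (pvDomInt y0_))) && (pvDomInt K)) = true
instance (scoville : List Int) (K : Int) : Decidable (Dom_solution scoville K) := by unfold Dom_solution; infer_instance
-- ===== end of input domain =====

-- B replaces A's binary heap by the two-queue strategy (sort once, then a FIFO list of merged
-- values whose production order is non-decreasing); equivalence is about the RETURN value only —
-- both Pythons mutate the argument (A heapifies/pops it, B sorts it).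


-- ===== PORT A =====
-- heapq is ported by its contract on the multiset of elements: the heap root / heappop is the
-- minimum value (PySem.List.min?, exact for Int elements since equal Ints are identical), heappop
-- removes one occurrence of it (List.erase), heappush adds the element.  Fuel = initial length is
-- a totality device only: each iteration shrinks the multiset by one, so it is never exhausted.
def solGoA (fuel : Nat) (l : List Int) (K : Int) (count : Int) : Int :=
  match fuel with
  | 0 => count
  | fuel + 1 =>
    match PySem.List.min? l (fun x => x) with
    | none => count                    -- empty heap: Python raises IndexError here (excluded by Pre_)
    | some m =>
      if m < K then
        if l.length = 1 then -1
        else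
          match PySem.List.min? (l.erase m) (fun x => x) with
          | none => count              -- unreachable: length ≥ 2
          | some m2 => solGoA fuel (((l.erase m).erase m2) ++ [m + 2 * m2]) K (count + 1)
      else count

def solution (scoville : List Int) (K : Int) : Int :=
  solGoA scoville.length scoville K 0

-- ===== PORT B =====
-- One pop of B's inner `for _ in range(2)` body: take the smaller of the two queue fronts
-- (`scoville[i] <= merged[j]` — a tie prefers the sorted originals).  The ([],[]) case is
-- unreachable (Python's front read raises IndexError before any pop can see two empty queues).
def takeMin : List Int → List Int → Int × List Int × List Int
  | a :: s, [] => (a, s, [])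
  | [], b :: q => (b, [], q)
  | a :: s, b :: q => if a ≤ b then (a, s, b :: q) else (b, a :: s, q)
  | [], [] => (0, [], [])

-- B's `while True` loop; s = remaining sorted originals (scoville[i:]), q = remaining merged
-- FIFO (merged[j:]).  Fuel = initial length, a totality device (each merge shrinks s++q by one).
def solGoB (fuel : Nat) (s q : List Int) (K : Int) (count : Int) : Int :=
  match fuel with
  | 0 => count
  | fuel + 1 =>
    if s.isEmpty && q.isEmpty then count   -- Python raises IndexError here (excluded by Pre_)
    else
      let p1 := takeMin s q                -- p1.1 = `smallest`, the front minimum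
      if p1.1 < K then
        if s.length + q.length == 1 then -1
        else
          let p2 := takeMin p1.2.1 p1.2.2
          solGoB fuel p2.2.1 (p2.2.2 ++ [p1.1 + 2 * p2.1]) K (count + 1)
      else count

def solution_alt (scoville : List Int) (K : Int) : Int :=
  solGoB scoville.length (PySem.List.sorted scoville (fun x => x) false) [] K 0

-- ===== PRECONDITION & SPEC =====
-- Pre_ excludes only the empty list, on which Python A raises IndexError at scoville[0].
def Pre_solution (scoville : List Int) (K : Int) : Prop := scoville ≠ []
instance (scoville : List Int) (K : Int) : Decidable (Pre_solution scoville K) := by unfold Pre_solution; infer_instance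
def pvWitness_solution : List Int × Int := ([1, 2, 3, 9, 10, 12], 7)

def Spec_solution (scoville : List Int) (K : Int) (out : Int) : Prop := out = solution_alt scoville K
instance (scoville : List Int) (K : Int) (out : Int) : Decidable (Spec_solution scoville K out) := by unfold Spec_solution; infer_instance

-- ===== CLAIM (what is proved, stated in full; the proofs are below) =====
def Claim_equal_solution : Prop := ∀ (scoville : List Int) (K : Int), Dom_solution scoville K → Pre_solution scoville K → Spec_solution scoville K (solution scoville K)

-- ===== LEMMAS AND PROOFS =====

-- Loop invariant on B's merged queue q: it is empty, or its newest (last) element is a + 2*b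
-- for a merge whose second-smallest operand b bounds from below everything that survived it.
def QInv (s q : List Int) : Prop :=
  q = [] ∨ ∃ q0 a b, q = q0 ++ [a + 2 * b] ∧ a ≤ b ∧ (∀ y ∈ s, b ≤ y) ∧ (∀ y ∈ q0, b ≤ y)

lemma min?_eq {l : List Int} {m : Int} (hm : m ∈ l) (hle : ∀ y ∈ l, m ≤ y) :
    PySem.List.min? l (fun x => x) = some m := by
  cases h : PySem.List.min? l (fun x => x) with
  | none =>
      have : l = [] := (PySem.List.min?_eq_none_iff l (fun x => x)).1 h
      subst this; simp at hm
  | some m' =>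
      have h1 : m' ≤ m := PySem.List.min?_isMin h m hm
      have h2 : m ≤ m' := hle m' (PySem.List.min?_mem h)
      simp [le_antisymm h1 h2]

lemma takeMin_cases {s q s1 q1 : List Int} {v : Int}
    (h : takeMin s q = (v, s1, q1)) (hne : s ≠ [] ∨ q ≠ []) :
    (s = v :: s1 ∧ q1 = q) ∨ (q = v :: q1 ∧ s1 = s) := by
  match s, q with
  | [], [] => tauto
  | a :: s, [] => simp [takeMin] at h; obtain ⟨rfl, rfl, rfl⟩ := h; left; simp
  | [], b :: q => simp [takeMin] at h; obtain ⟨rfl, rfl, rfl⟩ := h; right; simp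
  | a :: s, b :: q =>
      by_cases hab : a ≤ b
      · simp [takeMin, hab] at h; obtain ⟨rfl, rfl, rfl⟩ := h; left; simp
      · simp [takeMin, hab] at h; obtain ⟨rfl, rfl, rfl⟩ := h; right; simp

lemma takeMin_min {s q s1 q1 : List Int} {v : Int}
    (hs : s.Pairwise (fun a b : Int => a ≤ b)) (hq : q.Pairwise (fun a b : Int => a ≤ b))
    (h : takeMin s q = (v, s1, q1)) (hne : s ≠ [] ∨ q ≠ []) :
    ∀ y ∈ s ++ q, v ≤ y := by
  match s, q with
  | [], [] => tauto
  | a :: s, [] =>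
      simp [takeMin] at h; obtain ⟨rfl, rfl, rfl⟩ := h
      intro y hy; simp at hy
      rcases hy with rfl | hy
      · omega
      · exact (List.pairwise_cons.1 hs).1 y hy
  | [], b :: q =>
      simp [takeMin] at h; obtain ⟨rfl, rfl, rfl⟩ := h
      intro y hy; simp at hy
      rcases hy with rfl | hy
      · omega
      · exact (List.pairwise_cons.1 hq).1 y hy
  | a :: s, b :: q =>
      by_cases hab : a ≤ b
      · simp [takeMin, hab] at h; obtain ⟨rfl, rfl, rfl⟩ := h
        intro y hy; simp at hy
        rcases hy with rfl | hy | rfl | hy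
        · omega
        · exact (List.pairwise_cons.1 hs).1 y hy
        · omega
        · have := (List.pairwise_cons.1 hq).1 y hy; omega
      · simp [takeMin, hab] at h; obtain ⟨rfl, rfl, rfl⟩ := h
        intro y hy; simp at hy
        rcases hy with rfl | hy | rfl | hy
        · omega
        · have := (List.pairwise_cons.1 hs).1 y hy; omega
        · omega
        · exact (List.pairwise_cons.1 hq).1 y hy

-- In a ≤-sorted list ending in m, every element is ≤ m.
lemma last_ub {q0 : List Int} {m : Int}
    (h : (q0 ++ [m]).Pairwise (fun a b : Int => a ≤ b)) :
    ∀ y ∈ q0 ++ [m], y ≤ m := by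
  intro y hy
  rcases List.mem_append.1 hy with h0 | h1
  · exact (List.pairwise_append.1 h).2.2 y h0 m (by simp)
  · simp at h1; omega

-- The heart of the two-queue correctness: after popping the two minima v, w (v ≤ w), every
-- element still in the merged queue is ≤ the new merged value v + 2*w.
lemma q2_le {s q s1 q1 s2 q2 : List Int} {v w : Int}
    (hsq : q.Pairwise (fun a b : Int => a ≤ b)) (hinv : QInv s q) (hvw : v ≤ w)
    (hc1 : (s = v :: s1 ∧ q1 = q) ∨ (q = v :: q1 ∧ s1 = s))
    (hc2 : (s1 = w :: s2 ∧ q2 = q1) ∨ (q1 = w :: q2 ∧ s2 = s1)) :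
    ∀ y ∈ q2, y ≤ v + 2 * w := by
  rcases hinv with rfl | ⟨q0, a, b, rfl, hab, hbs, hbq0⟩
  · -- q = []
    rcases hc1 with ⟨rfl, rfl⟩ | ⟨h, _⟩
    · rcases hc2 with ⟨rfl, rfl⟩ | ⟨h, _⟩
      · simp
      · simp at h
    · simp at h
  · have hub := last_ub hsq
    -- either the queue remainder is empty, or it sits inside q and b ≤ v
    have key : q2 = [] ∨ ((∀ y ∈ q2, y ∈ q0 ++ [a + 2 * b]) ∧ b ≤ v) := by
      rcases hc1 with ⟨hs_eq, hq1q⟩ | ⟨hq_eq, hs1s⟩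
      · -- v popped from s
        right
        refine ⟨?_, hbs v (by rw [hs_eq]; simp)⟩
        rcases hc2 with ⟨hs1_eq, hq2q1⟩ | ⟨hq1_eq, hs2⟩
        · intro y hy; rw [hq2q1, hq1q] at hy; exact hy
        · intro y hy
          have hmem : y ∈ q1 := by rw [hq1_eq]; exact List.mem_cons_of_mem _ hy
          rw [hq1q] at hmem; exact hmem
      · -- v popped from q
        cases q0 with
        | nil =>
            simp only [List.nil_append] at hq_eq
            injection hq_eq with hv hq1
            rcases hc2 with ⟨hs1_eq, hq2q1⟩ | ⟨hq1_eq, hs2⟩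
            · left; rw [hq2q1, ← hq1]
            · rw [← hq1] at hq1_eq; simp at hq1_eq
        | cons c q0' =>
            simp only [List.cons_append] at hq_eq
            injection hq_eq with hv hq1
            right
            constructor
            · rcases hc2 with ⟨hs1_eq, hq2q1⟩ | ⟨hq1_eq, hs2⟩
              · intro y hy
                have hmem : y ∈ q0' ++ [a + 2 * b] := by rw [hq2q1, ← hq1] at hy; exact hy
                simp only [List.cons_append, List.mem_cons]
                exact Or.inr hmem
              · intro y hy
                have h' : q0' ++ [a + 2 * b] = w :: q2 := by rw [hq1, hq1_eq]
                have hmem : y ∈ q0' ++ [a + 2 * b] := by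
                  rw [h']; exact List.mem_cons_of_mem _ hy
                simp only [List.cons_append, List.mem_cons]
                exact Or.inr hmem
            · have hbc := hbq0 c (by simp)
              omega
    rcases key with rfl | ⟨hsub, hbv⟩
    · simp
    · intro y hy
      have := hub y (hsub y hy)
      omega

lemma pairwise_tail_of_cases {s s1 q q1 : List Int} {v : Int}
    (hs : s.Pairwise (fun a b : Int => a ≤ b)) (hq : q.Pairwise (fun a b : Int => a ≤ b))
    (hc : (s = v :: s1 ∧ q1 = q) ∨ (q = v :: q1 ∧ s1 = s)) :
    s1.Pairwise (fun a b : Int => a ≤ b) ∧ q1.Pairwise (fun a b : Int => a ≤ b) := by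
  rcases hc with ⟨rfl, rfl⟩ | ⟨rfl, rfl⟩
  · exact ⟨(List.pairwise_cons.1 hs).2, hq⟩
  · exact ⟨hs, (List.pairwise_cons.1 hq).2⟩

lemma perm_of_cases {s s1 q q1 : List Int} {v : Int}
    (hc : (s = v :: s1 ∧ q1 = q) ∨ (q = v :: q1 ∧ s1 = s)) :
    (s ++ q).Perm (v :: (s1 ++ q1)) := by
  rcases hc with ⟨rfl, rfl⟩ | ⟨rfl, rfl⟩
  · simp
  · exact List.perm_middle

-- Loop invariant: A's heap and B's two queues hold the same multiset; B's queues are sorted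
-- and q satisfies QInv.  Then both loops compute the same result.
lemma go_eq (fuel : Nat) : ∀ (l s q : List Int) (K count : Int),
    l.Perm (s ++ q) →
    s.Pairwise (fun a b : Int => a ≤ b) → q.Pairwise (fun a b : Int => a ≤ b) →
    QInv s q →
    solGoA fuel l K count = solGoB fuel s q K count := by
  induction fuel with
  | zero => intros; rfl
  | succ fuel ih =>
    intro l s q K count hp hss hsq hinv
    by_cases hemp : s = [] ∧ q = []
    · obtain ⟨rfl, rfl⟩ := hemp
      have hl : l = [] := by simpa using hp.eq_nil
      subst hl
      simp [solGoA, solGoB, PySem.List.min?]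
    · have hne : s ≠ [] ∨ q ≠ [] := by tauto
      have hbe : (s.isEmpty && q.isEmpty) = false := by
        rcases hne with h | h <;> cases s <;> cases q <;> simp_all
      rcases h1 : takeMin s q with ⟨v, p1⟩
      rcases hp1 : p1 with ⟨s1, q1⟩
      rw [hp1] at h1
      have hc1 := takeMin_cases h1 hne
      have hvmin := takeMin_min hss hsq h1 hne
      have hperm1 := perm_of_cases hc1
      have hvmem : v ∈ s ++ q := hperm1.symm.mem_iff.1 (by simp)
      have hminA : PySem.List.min? l (fun x => x) = some v :=
        min?_eq (hp.mem_iff.2 hvmem) (fun y hy => hvmin y (hp.mem_iff.1 hy))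
      have hlen : l.length = s.length + q.length := by simpa using hp.length_eq
      obtain ⟨hss1, hsq1⟩ := pairwise_tail_of_cases hss hsq hc1
      by_cases hK : v < K
      · by_cases h1len : s.length + q.length = 1
        · -- single element below K: both return -1
          simp [solGoA, solGoB, hbe, h1, hminA, hK, hlen, h1len]
        · have hlen1 : (s1 ++ q1).length + 1 = s.length + q.length := by
            simpa using hperm1.length_eq.symm
          have hne2 : s1 ≠ [] ∨ q1 ≠ [] := by
            by_contra hcon
            push Not at hcon
            obtain ⟨rfl, rfl⟩ := hcon
            simp at hlen1
            omega
          rcases h2 : takeMin s1 q1 with ⟨w, p2⟩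
          rcases hp2 : p2 with ⟨s2, q2⟩
          rw [hp2] at h2
          have hc2 := takeMin_cases h2 hne2
          have hwmin := takeMin_min hss1 hsq1 h2 hne2
          have hperm2 := perm_of_cases hc2
          have hwmem : w ∈ s1 ++ q1 := hperm2.symm.mem_iff.1 (by simp)
          -- A's second pop
          have herase1 : (l.erase v).Perm (s1 ++ q1) := by
            have := (hp.trans hperm1).erase v
            simpa using this
          have hminA2 : PySem.List.min? (l.erase v) (fun x => x) = some w :=
            min?_eq (herase1.mem_iff.2 hwmem) (fun y hy => hwmin y (herase1.mem_iff.1 hy))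
          have herase2 : ((l.erase v).erase w).Perm (s2 ++ q2) := by
            have := (herase1.trans hperm2).erase w
            simpa using this
          -- invariant for the next iteration
          have hpnext : (((l.erase v).erase w) ++ [v + 2 * w]).Perm (s2 ++ (q2 ++ [v + 2 * w])) := by
            have := herase2.append_right [v + 2 * w]
            simpa [List.append_assoc] using this
          obtain ⟨hss2, hsq2⟩ := pairwise_tail_of_cases hss1 hsq1 hc2
          have hvw : v ≤ w := hvmin w (hperm1.symm.mem_iff.1 (by simp [hwmem]))
          have hq2le := q2_le hsq hinv hvw hc1 hc2
          have hsq2' : (q2 ++ [v + 2 * w]).Pairwise (fun a b : Int => a ≤ b) := by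
            rw [List.pairwise_append]
            exact ⟨hsq2, by simp, by intro x hx y hy; simp at hy; subst hy; exact hq2le x hx⟩
          have hwlow : ∀ y ∈ s2 ++ q2, w ≤ y := fun y hy =>
            hwmin y (hperm2.symm.mem_iff.1 (by simp [hy]))
          have hinv' : QInv s2 (q2 ++ [v + 2 * w]) := by
            right
            exact ⟨q2, v, w, rfl, hvw,
              fun y hy => hwlow y (by simp [hy]),
              fun y hy => hwlow y (by simp [hy])⟩
          have hlA : l.length ≠ 1 := by omega
          have hlB : (s.length + q.length == 1) = false := by
            simp [h1len]
          simp only [solGoA, solGoB, hbe, Bool.false_eq_true, if_false, h1, h2, hminA, hminA2,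
            if_pos hK, if_neg hlA, hlB]
          exact ih _ _ _ K (count + 1) hpnext hss2 hsq2' hinv'
      · -- front ≥ K: both return count
        simp [solGoA, solGoB, hbe, h1, hminA, hK]

-- ===== VERDICT (by name: the statement is the Claim_ definition above) =====
theorem solution_spec : Claim_equal_solution := by
  intro scoville K _ _
  unfold Spec_solution solution solution_alt
  have hperm : (PySem.List.sorted scoville (fun x => x) false).Perm scoville :=
    PySem.List.sorted_perm scoville (fun x => x) false
  have := go_eq scoville.length scoville (PySem.List.sorted scoville (fun x => x) false) [] K 0
    (by simpa using hperm.symm)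
    (PySem.List.sorted_pairwise scoville (fun x => x))
    (by simp) (Or.inl rfl)
  exact this
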